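-- pv_equiv track=rewrite | github.com/WGabrielCode/Algorithms_DataStructures | Introduction_to_ComputerScience/Set_3_LargerLists/92.py | spirala
-- ===== SOURCE A (Python) =====
-- def spirala( l ) :
--     t = [[0 for _ in range( l ) ] for _ in range( l )]
--     dir = [ ( 0 , 1 ) , ( 1 , 0 ) , ( 0 , -1 ) ,( -1 , 0 ) ]
--     dirindx = 0
--     x , y = 0 , 0
--     for i in range( 1, l * l + 1 ) :
--        t[ x ][ y ] = i
--        endx , endy = x + dir[ dirindx ][ 0 ] , y + dir[ dirindx ][ 1 ]
--        if endx < 0 or endx >= l or endy < 0 or endy >= l or t[ endx ][ endy ] != 0 :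
--            dirindx = (dirindx + 1) % 4
--            endx , endy  = x + dir[ dirindx ][ 0 ] , y + dir[ dirindx ][ 1 ]
--        x , y = endx , endy
--     return t
-- ===== SOURCE B (Python) =====
-- def spirala(l):
--     # closed form: each cell's spiral number is computed directly from its ring and segment
--     res = []
--     ll = l * l
--     l1 = l - 1
--     for i in range(l):
--         row = []
--         l1i = l1 - i
--         for j in range(l):
--             r = min(i, j, l1i, l1 - j)
--             m = l - 2 * r
--             if i == r:
--                 off = j - r
--             elif j == l1 - r:
--                 off = (m - 1) + (i - r)
--             elif i == l1 - r:
--                 off = 2 * (m - 1) + (l1 - r - j)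
--             else:
--                 off = 3 * (m - 1) + (l1 - r - i)
--             row.append(ll - m * m + off + 1)
--         res.append(row)
--     return res
-- ===== Notes on version B (the rewrite author's own statement) =====
-- stated objective: alternative
-- what changed: A simulates the spiral walk cell by cell with a mutable matrix, direction index and turn-on-collision logic; B computes each cell's spiral number directly by a closed-form formula from its ring index and segment, with no state at all.
import Mathlib
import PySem

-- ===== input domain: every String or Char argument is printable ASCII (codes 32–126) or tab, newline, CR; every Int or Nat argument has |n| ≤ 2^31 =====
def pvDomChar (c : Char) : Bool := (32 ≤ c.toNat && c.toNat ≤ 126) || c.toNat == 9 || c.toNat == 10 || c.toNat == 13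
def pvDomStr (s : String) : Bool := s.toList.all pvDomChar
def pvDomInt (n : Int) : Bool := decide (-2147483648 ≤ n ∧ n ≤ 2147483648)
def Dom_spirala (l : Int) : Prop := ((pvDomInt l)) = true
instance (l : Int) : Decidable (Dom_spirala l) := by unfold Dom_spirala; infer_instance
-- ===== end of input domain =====

-- B replaces A's stateful spiral walk by a closed-form per-cell formula (ring + segment); alternative
-- algorithm, same O(l^2) cost.  On negative side lengths A raises IndexError while B returns the empty matrix
-- (excluded by Pre_spirala).

-- ===== PORT A =====
-- loop body of A's 'for i in range(1, l*l+1)'; state (t, dirindx, x, y).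
-- t[x][y] = i and the reads are PySem pySetD/pyGetD (exact wherever Python does not raise;
-- under Pre_spirala the walk keeps 0 ≤ x, y < l, proved below).
def spiralaStep (l : Int) (s : List (List Int) × Int × Int × Int) (i : Int) :
    List (List Int) × Int × Int × Int :=
  match s with
  | (t, dirindx, x, y) =>
    let dir : List (Int × Int) := [(0, 1), (1, 0), (0, -1), (-1, 0)]
    let t1 := PySem.List.pySetD t x (PySem.List.pySetD (PySem.List.pyGetD t x []) y i)
    let d0 := (PySem.List.pyGet? dir dirindx).getD (0, 0)
    let endx := x + d0.1
    let endy := y + d0.2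
    if endx < 0 ∨ endx ≥ l ∨ endy < 0 ∨ endy ≥ l ∨
        PySem.List.pyGetD (PySem.List.pyGetD t1 endx []) endy 0 ≠ 0 then
      let dirindx' := PySem.Int.mod (dirindx + 1) 4
      let d1 := (PySem.List.pyGet? dir dirindx').getD (0, 0)
      (t1, dirindx', x + d1.1, y + d1.2)
    else
      (t1, dirindx, endx, endy)

def spirala (l : Int) : List (List Int) :=
  let t0 := (PySem.List.pyRange 0 l 1).map (fun _ => (PySem.List.pyRange 0 l 1).map (fun _ => (0 : Int)))
  ((PySem.List.pyRange 1 (l * l + 1) 1).foldl (spiralaStep l) (t0, 0, 0, 0)).1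

-- ===== PORT B =====
-- closed-form spiral number of cell (i, j) in the l×l grid (body of Source B's inner loop)
def fI (l i j : Int) : Int :=
  let r := min (min i j) (min (l - 1 - i) (l - 1 - j))
  let m := l - 2 * r
  let off :=
    if i = r then j - r
    else if j = l - 1 - r then (m - 1) + (i - r)
    else if i = l - 1 - r then 2 * (m - 1) + (l - 1 - r - j)
    else 3 * (m - 1) + (l - 1 - r - i)
  l * l - m * m + off + 1

def spirala_alt (l : Int) : List (List Int) :=
  (PySem.List.pyRange 0 l 1).map (fun i => (PySem.List.pyRange 0 l 1).map (fun j => fI l i j))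

-- ===== PRECONDITION & SPEC =====
-- Pre_ excludes exactly the negative side lengths, where A raises IndexError (t is empty but the
-- loop body still indexes its first cell).
def Pre_spirala (l : Int) : Prop := 0 ≤ l
instance (l : Int) : Decidable (Pre_spirala l) := by unfold Pre_spirala; infer_instance
def pvWitness_spirala : Int := 4

def Spec_spirala (l : Int) (out : List (List Int)) : Prop := out = spirala_alt l
instance (l : Int) (out : List (List Int)) : Decidable (Spec_spirala l out) := by
  unfold Spec_spirala; infer_instance

-- ===== CLAIM (what is proved, stated in full; the proofs are below) =====
def Claim_equal_spirala : Prop := ∀ (l : Int), Dom_spirala l → Pre_spirala l → Spec_spirala l (spirala l)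

-- ===== LEMMAS AND PROOFS =====

-- ring index of a cell and its incoming direction on the spiral walk
def ringOf (l i j : Int) : Int := min (min i j) (min (l - 1 - i) (l - 1 - j))

def offOf (l i j r : Int) : Int :=
  if i = r then j - r
  else if j = l - 1 - r then (l - 2 * r - 1) + (i - r)
  else if i = l - 1 - r then 2 * (l - 2 * r - 1) + (l - 1 - r - j)
  else 3 * (l - 2 * r - 1) + (l - 1 - r - i)

def inD (l x y : Int) : Int :=
  if x = ringOf l x y then 0
  else if y = l - 1 - ringOf l x y then 1
  else if x = l - 1 - ringOf l x y then 2
  else 3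

lemma fI_eq (l i j : Int) :
    fI l i j = l * l - (l - 2 * ringOf l i j) * (l - 2 * ringOf l i j) + offOf l i j (ringOf l i j) + 1 := by
  simp only [fI, offOf, ringOf]

-- grid hypotheses bundle: bounds on the ring index, and the fact that it is attained
lemma ringOf_spec {l i j : Int} (hi : 0 ≤ i) (hi2 : i < l) (hj : 0 ≤ j) (hj2 : j < l) :
    0 ≤ ringOf l i j ∧ ringOf l i j ≤ i ∧ ringOf l i j ≤ j ∧
    ringOf l i j ≤ l - 1 - i ∧ ringOf l i j ≤ l - 1 - j ∧
    (ringOf l i j = i ∨ ringOf l i j = j ∨ ringOf l i j = l - 1 - i ∨ ringOf l i j = l - 1 - j) := by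
  unfold ringOf; omega

-- offset bounds inside a ring: 0 ≤ off ≤ 4*(m-1) - 1 for m ≥ 2, off = 0 for m = 1
lemma offOf_bounds {l i j : Int} (hi : 0 ≤ i) (hi2 : i < l) (hj : 0 ≤ j) (hj2 : j < l) :
    0 ≤ offOf l i j (ringOf l i j) ∧
    offOf l i j (ringOf l i j) ≤ max 0 (4 * (l - 2 * ringOf l i j - 1) - 1) := by
  have h := ringOf_spec hi hi2 hj hj2
  generalize hR : ringOf l i j = r at h ⊢
  unfold offOf; split_ifs <;> omega

lemma fI_lb {l i j : Int} (hi : 0 ≤ i) (hi2 : i < l) (hj : 0 ≤ j) (hj2 : j < l) :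
    l * l - (l - 2 * ringOf l i j) * (l - 2 * ringOf l i j) < fI l i j := by
  have h := offOf_bounds hi hi2 hj hj2
  rw [fI_eq]; omega

lemma fI_ub {l i j : Int} (hi : 0 ≤ i) (hi2 : i < l) (hj : 0 ≤ j) (hj2 : j < l) :
    fI l i j ≤ l * l - (l - 2 * ringOf l i j) * (l - 2 * ringOf l i j)
      + max 1 (4 * (l - 2 * ringOf l i j - 1)) := by
  have h := offOf_bounds hi hi2 hj hj2
  rw [fI_eq]; omega

lemma fI_le_sq {l i j : Int} (hi : 0 ≤ i) (hi2 : i < l) (hj : 0 ≤ j) (hj2 : j < l) :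
    fI l i j ≤ l * l := by
  have h := fI_ub hi hi2 hj hj2
  have hr := ringOf_spec hi hi2 hj hj2
  generalize hR : ringOf l i j = r at h hr
  have hm : 1 ≤ l - 2 * r := by omega
  have hsq : 0 ≤ (l - 2 * r - 2) * (l - 2 * r - 2) := mul_self_nonneg _
  have hid : (l - 2 * r - 2) * (l - 2 * r - 2)
      = (l - 2 * r) * (l - 2 * r) - 4 * (l - 2 * r) + 4 := by ring
  have hone : (l - 2 * r) ≤ (l - 2 * r) * (l - 2 * r) := le_mul_of_one_le_left (by omega) (by omega)
  omega

lemma fI_pos {l i j : Int} (hi : 0 ≤ i) (hi2 : i < l) (hj : 0 ≤ j) (hj2 : j < l) :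
    1 ≤ fI l i j := by
  have h := fI_lb hi hi2 hj hj2
  have hr := ringOf_spec hi hi2 hj hj2
  generalize hR : ringOf l i j = r at h hr
  nlinarith [mul_self_nonneg (l - 2 * r)]

-- cells in a strictly smaller ring have strictly smaller spiral numbers
lemma fI_lt_of_ring_lt {l a b i j : Int} (ha : 0 ≤ a) (ha2 : a < l) (hb : 0 ≤ b) (hb2 : b < l)
    (hi : 0 ≤ i) (hi2 : i < l) (hj : 0 ≤ j) (hj2 : j < l)
    (h : ringOf l a b < ringOf l i j) : fI l a b < fI l i j := by
  have h1 := fI_ub ha ha2 hb hb2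
  have h2 := fI_lb hi hi2 hj hj2
  have hr1 := ringOf_spec ha ha2 hb hb2
  have hr2 := ringOf_spec hi hi2 hj hj2
  set m1 := l - 2 * ringOf l a b with hm1
  set m2 := l - 2 * ringOf l i j with hm2
  have hmono : m2 * m2 ≤ (m1 - 2) * (m1 - 2) := by
    have hle : m2 ≤ m1 - 2 := by omega
    have h0 : (0:Int) ≤ m2 := by omega
    exact mul_le_mul hle hle h0 (by omega)
  have hid : (m1 - 2) * (m1 - 2) = m1 * m1 - 4 * m1 + 4 := by ring
  omega

lemma fI_inj {l a b i j : Int} (ha : 0 ≤ a) (ha2 : a < l) (hb : 0 ≤ b) (hb2 : b < l)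
    (hi : 0 ≤ i) (hi2 : i < l) (hj : 0 ≤ j) (hj2 : j < l)
    (h : fI l a b = fI l i j) : a = i ∧ b = j := by
  have hring : ringOf l a b = ringOf l i j := by
    rcases lt_trichotomy (ringOf l a b) (ringOf l i j) with hlt | heq | hgt
    · exact absurd (fI_lt_of_ring_lt ha ha2 hb hb2 hi hi2 hj hj2 hlt) (by omega)
    · exact heq
    · exact absurd (fI_lt_of_ring_lt hi hi2 hj hj2 ha ha2 hb hb2 hgt) (by omega)
  rw [fI_eq, fI_eq, hring] at h
  have hr1 := ringOf_spec ha ha2 hb hb2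
  have hr2 := ringOf_spec hi hi2 hj hj2
  rw [hring] at hr1
  generalize hR : ringOf l i j = r at h hr1 hr2
  have hoff : offOf l a b r = offOf l i j r := by omega
  unfold offOf at hoff
  constructor <;> (revert hoff; split_ifs <;> omega)

-- the matrix after the first k values have been written
def mkMat (l k : Int) : List (List Int) :=
  (PySem.List.pyRange 0 l 1).map (fun i =>
    (PySem.List.pyRange 0 l 1).map (fun j => if fI l i j ≤ k then fI l i j else 0))

-- loop invariant after k iterations
def SpInv (l k : Int) (s : List (List Int) × Int × Int × Int) : Prop :=
  s.1 = mkMat l k ∧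
  (k < l * l →
    0 ≤ s.2.2.1 ∧ s.2.2.1 < l ∧ 0 ≤ s.2.2.2 ∧ s.2.2.2 < l ∧
    fI l s.2.2.1 s.2.2.2 = k + 1 ∧ s.2.1 = inD l s.2.2.1 s.2.2.2)

lemma mkMat_read (l k a b : Int) (ha : 0 ≤ a) (ha2 : a < l) (hb : 0 ≤ b) (hb2 : b < l) :
    PySem.List.pyGetD (PySem.List.pyGetD (mkMat l k) a []) b 0
      = (if fI l a b ≤ k then fI l a b else 0) := by
  unfold mkMat
  rw [PySem.List.pyGetD_map_pyRange_of_nonneg _ _ _ _ ha ha2,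
      PySem.List.pyGetD_map_pyRange_of_nonneg _ _ _ _ hb hb2]

lemma mkMat_eq_range (l k : Int) :
    mkMat l k = (List.range l.toNat).map (fun (i : Nat) =>
      (List.range l.toNat).map (fun (j : Nat) =>
        if fI l (i : Int) (j : Int) ≤ k then fI l (i : Int) (j : Int) else 0)) := by
  unfold mkMat
  rw [PySem.List.pyRange_zero]
  simp only [List.map_map, Function.comp_def]

lemma mkMat_row (l k a : Int) (ha : 0 ≤ a) (ha2 : a < l) :
    PySem.List.pyGetD (mkMat l k) a []
      = (PySem.List.pyRange 0 l 1).map (fun j => if fI l a j ≤ k then fI l a j else 0) := by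
  unfold mkMat
  rw [PySem.List.pyGetD_map_pyRange_of_nonneg _ _ _ _ ha ha2]

-- cells other than (x, y) do not change when value k+1 is written at (x, y)
lemma cell_stable {l k x y : Int} (hx : 0 ≤ x) (hx2 : x < l) (hy : 0 ≤ y) (hy2 : y < l)
    (hf : fI l x y = k + 1) {i j : Int} (hi : 0 ≤ i) (hi2 : i < l) (hj : 0 ≤ j) (hj2 : j < l)
    (hne : ¬(i = x ∧ j = y)) :
    (if fI l i j ≤ k then fI l i j else 0) = (if fI l i j ≤ k + 1 then fI l i j else 0) := by
  by_cases hle : fI l i j ≤ k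
  · rw [if_pos hle, if_pos (by omega)]
  · have hnot : ¬ fI l i j ≤ k + 1 := by
      intro hcon
      have heq : fI l i j = fI l x y := by omega
      have h2 := fI_inj hi hi2 hj hj2 hx hx2 hy hy2 heq
      exact hne ⟨h2.1, h2.2⟩
    rw [if_neg hle, if_neg hnot]

lemma mkMat_write (l k x y : Int) (hx : 0 ≤ x) (hx2 : x < l) (hy : 0 ≤ y) (hy2 : y < l)
    (hf : fI l x y = k + 1) :
    PySem.List.pySetD (mkMat l k) x
        (PySem.List.pySetD (PySem.List.pyGetD (mkMat l k) x []) y (k + 1)) = mkMat l (k + 1) := by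
  have hxn : ((x.toNat : Int)) = x := Int.toNat_of_nonneg hx
  have hyn : ((y.toNat : Int)) = y := Int.toNat_of_nonneg hy
  rw [mkMat_row l k x hx hx2, PySem.List.pySetD_of_nonneg _ _ hy, PySem.List.pySetD_of_nonneg _ _ hx]
  rw [mkMat_eq_range, mkMat_eq_range, PySem.List.pyRange_zero]
  simp only [List.map_map, Function.comp_def]
  apply List.ext_getElem
  · simp
  · intro i hi1 hi2
    have hin : (i : Int) < l := by
      have : i < l.toNat := by simpa using hi1
      omega
    simp only [List.getElem_set, List.getElem_map, List.getElem_range]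
    by_cases hix : x.toNat = i
    · have hxi : x = (i : Int) := by omega
      rw [if_pos hix, hxi]
      apply List.ext_getElem
      · simp
      · intro j hj1 hj2
        have hjn : (j : Int) < l := by
          have : j < l.toNat := by simpa using hj1
          omega
        simp only [List.getElem_set, List.getElem_map, List.getElem_range]
        by_cases hjy : y.toNat = j
        · have hyj : y = (j : Int) := by omega
          rw [if_pos hjy]
          have hfe : fI l (i : Int) (j : Int) = k + 1 := by
            rw [← hxi, ← hyj]; exact hf
          rw [hfe, if_pos (le_refl _)]
        · rw [if_neg hjy]
          exact cell_stable (x := (i : Int)) (y := y) (by omega) (by omega) hy hy2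
            (by rw [← hxi]; exact hf)
            (Int.natCast_nonneg i) hin (Int.natCast_nonneg j) hjn (fun hc => hjy (by omega))
    · rw [if_neg hix]
      apply List.map_congr_left
      intro j hj
      have hjn : (j : Int) < l := by
        have : j < l.toNat := List.mem_range.mp hj
        omega
      exact cell_stable hx hx2 hy hy2 hf (Int.natCast_nonneg i) hin (Int.natCast_nonneg j) hjn
        (fun hc => hix (by omega))

-- ring = r iff r is a lower bound of the four border distances and is attained
lemma ringOf_eq {l i j r : Int} (h1 : r ≤ i) (h2 : r ≤ j) (h3 : r ≤ l - 1 - i) (h4 : r ≤ l - 1 - j)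
    (h5 : i = r ∨ j = r ∨ l - 1 - i = r ∨ l - 1 - j = r) : ringOf l i j = r := by
  unfold ringOf; omega

-- the four direction-table lookups and the mod-4 increments, computed once
lemma dirTab0 : ((PySem.List.pyGet? [((0:Int),(1:Int)),(1,0),(0,-1),(-1,0)] 0).getD (0,0)) = (0,1) := by decide
lemma dirTab1 : ((PySem.List.pyGet? [((0:Int),(1:Int)),(1,0),(0,-1),(-1,0)] 1).getD (0,0)) = (1,0) := by decide
lemma dirTab2 : ((PySem.List.pyGet? [((0:Int),(1:Int)),(1,0),(0,-1),(-1,0)] 2).getD (0,0)) = (0,-1) := by decide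
lemma dirTab3 : ((PySem.List.pyGet? [((0:Int),(1:Int)),(1,0),(0,-1),(-1,0)] 3).getD (0,0)) = (-1,0) := by decide
lemma mod41 : PySem.Int.mod ((0:Int) + 1) 4 = 1 := by decide
lemma mod42 : PySem.Int.mod ((1:Int) + 1) 4 = 2 := by decide
lemma mod43 : PySem.Int.mod ((2:Int) + 1) 4 = 3 := by decide
lemma mod40 : PySem.Int.mod ((3:Int) + 1) 4 = 0 := by decide

-- one iteration of the loop preserves the invariant
lemma step_inv (l k : Int) (s : List (List Int) × Int × Int × Int)
    (hk : 0 ≤ k) (hkl : k < l * l) (hs : SpInv l k s) :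
    SpInv l (k + 1) (spiralaStep l s (k + 1)) := by
  obtain ⟨t, d, x, y⟩ := s
  obtain ⟨ht, hpos⟩ := hs
  simp only at ht hpos
  obtain ⟨hx, hx2, hy, hy2, hf, hd⟩ := hpos hkl
  subst ht
  have hw := mkMat_write l k x y hx hx2 hy hy2 hf
  rcases eq_or_lt_of_le (by omega : k + 1 ≤ l * l) with hlast | hmid
  · refine ⟨?_, fun h => absurd h (by omega)⟩
    simp only [spiralaStep]
    split <;> simpa using hw
  · -- not the last cell: full position/direction bookkeeping
    set r := ringOf l x y with hr
    have hrs := ringOf_spec hx hx2 hy hy2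
    rw [← hr] at hrs
    obtain ⟨hr0, hrx, hry, hrxb, hryb, hratt⟩ := hrs
    have hflb := fI_lb hx hx2 hy hy2; rw [← hr] at hflb
    have hfub := fI_ub hx hx2 hy hy2; rw [← hr] at hfub
    have hfe := fI_eq l x y; rw [← hr] at hfe
    have hm2 : 2 ≤ l - 2 * r := by
      by_contra hcon
      have h1 : l - 2 * r = 1 := by omega
      have h2 : (l - 2 * r) * (l - 2 * r) = 1 := by rw [h1]; norm_num
      omega
    by_cases hT : x = r
    · by_cases hC : y = l - 1 - r
      · -- top-right corner: turn down
        have hd0 : d = 0 := by rw [hd]; unfold inD; rw [← hr, if_pos hT]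
        subst hd0
        have hring1 : ringOf l (x + 1) y = r :=
          ringOf_eq (by omega) (by omega) (by omega) (by omega) (by omega)
        have hnext : fI l (x + 1) y = k + 2 := by
          have h2 := fI_eq l (x + 1) y; rw [hring1] at h2
          unfold offOf at h2 hfe
          rw [if_pos hT] at hfe
          rw [if_neg (by omega), if_pos (by omega)] at h2
          omega
        have hvis : r ≠ 0 → PySem.List.pyGetD (PySem.List.pyGetD (mkMat l (k + 1)) x []) (y + 1) 0 ≠ 0 := by
          intro hr1
          have hyl : y + 1 < l := by omega
          have hringA : ringOf l x (y + 1) = r - 1 :=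
            ringOf_eq (by omega) (by omega) (by omega) (by omega) (by omega)
          have hubA := fI_ub hx hx2 (by omega : (0:Int) ≤ y + 1) hyl
          have hposA := fI_pos hx hx2 (by omega : (0:Int) ≤ y + 1) hyl
          rw [hringA] at hubA
          have hid : (l - 2 * (r - 1)) * (l - 2 * (r - 1))
              = (l - 2 * r) * (l - 2 * r) + 4 * (l - 2 * r) + 4 := by ring
          rw [mkMat_read l (k + 1) x (y + 1) (by omega) (by omega) (by omega) (by omega)]
          rw [if_pos (by omega)]
          omega
        simp only [spiralaStep, dirTab0, dirTab1, mod41, add_zero]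
        rw [hw]
        split_ifs with hg
        · refine ⟨rfl, fun _ => ?_⟩
          show 0 ≤ x + 1 ∧ x + 1 < l ∧ 0 ≤ y ∧ y < l ∧ fI l (x + 1) y = k + 1 + 1 ∧
            (1 : Int) = inD l (x + 1) y
          refine ⟨by omega, by omega, by omega, by omega, by omega, ?_⟩
          unfold inD
          rw [hring1, if_neg (by omega), if_pos (by omega)]
        · exfalso
          by_cases hr1 : r = 0
          · exact hg (by right; right; right; left; omega)
          · exact hg (by right; right; right; right; exact hvis hr1)
      · -- top row: straight right
        have hd0 : d = 0 := by rw [hd]; unfold inD; rw [← hr, if_pos hT]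
        subst hd0
        have hyc : y < l - 1 - r := by omega
        have hring1 : ringOf l x (y + 1) = r :=
          ringOf_eq (by omega) (by omega) (by omega) (by omega) (Or.inl hT)
        have hnext : fI l x (y + 1) = k + 2 := by
          have h2 := fI_eq l x (y + 1); rw [hring1] at h2
          unfold offOf at h2 hfe
          rw [if_pos hT] at h2 hfe
          omega
        simp only [spiralaStep, dirTab0, add_zero]
        rw [hw]
        have hread : PySem.List.pyGetD (PySem.List.pyGetD (mkMat l (k + 1)) x []) (y + 1) 0 = 0 := by
          rw [mkMat_read l (k + 1) x (y + 1) (by omega) (by omega) (by omega) (by omega)]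
          rw [if_neg (by omega)]
        rw [if_neg (by push_neg; exact ⟨by omega, by omega, by omega, by omega, by rw [hread]⟩)]
        refine ⟨rfl, fun _ => ?_⟩
        show 0 ≤ x ∧ x < l ∧ 0 ≤ y + 1 ∧ y + 1 < l ∧ fI l x (y + 1) = k + 1 + 1 ∧ (0 : Int) = inD l x (y + 1)
        refine ⟨by omega, by omega, by omega, by omega, by omega, ?_⟩
        unfold inD
        rw [hring1, if_pos hT]
    · by_cases hR : y = l - 1 - r
      · by_cases hC : x = l - 1 - r
        · -- bottom-right corner: turn left
          have hd0 : d = 1 := by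
            rw [hd]; unfold inD; rw [← hr, if_neg (by omega), if_pos (by omega)]
          subst hd0
          have hring1 : ringOf l x (y + -1) = r :=
            ringOf_eq (by omega) (by omega) (by omega) (by omega) (by omega)
          have hnext : fI l x (y + -1) = k + 2 := by
            have h2 := fI_eq l x (y + -1); rw [hring1] at h2
            unfold offOf at h2 hfe
            rw [if_neg (by omega), if_pos (by omega)] at hfe
            rw [if_neg (by omega), if_neg (by omega), if_pos (by omega)] at h2
            omega
          have hvis : r ≠ 0 → PySem.List.pyGetD (PySem.List.pyGetD (mkMat l (k + 1)) (x + 1) []) y 0 ≠ 0 := by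
            intro hr1
            have hxl : x + 1 < l := by omega
            have hringA : ringOf l (x + 1) y = r - 1 :=
              ringOf_eq (by omega) (by omega) (by omega) (by omega) (by omega)
            have hubA := fI_ub (by omega : (0:Int) ≤ x + 1) hxl hy hy2
            have hposA := fI_pos (by omega : (0:Int) ≤ x + 1) hxl hy hy2
            rw [hringA] at hubA
            have hid : (l - 2 * (r - 1)) * (l - 2 * (r - 1))
                = (l - 2 * r) * (l - 2 * r) + 4 * (l - 2 * r) + 4 := by ring
            rw [mkMat_read l (k + 1) (x + 1) y (by omega) (by omega) (by omega) (by omega)]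
            rw [if_pos (by omega)]
            omega
          simp only [spiralaStep, dirTab1, dirTab2, mod42, add_zero]
          rw [hw]
          split_ifs with hg
          · refine ⟨rfl, fun _ => ?_⟩
            show 0 ≤ x ∧ x < l ∧ 0 ≤ y + -1 ∧ y + -1 < l ∧ fI l x (y + -1) = k + 1 + 1 ∧
              (2 : Int) = inD l x (y + -1)
            refine ⟨by omega, by omega, by omega, by omega, by omega, ?_⟩
            unfold inD
            rw [hring1, if_neg (by omega), if_neg (by omega), if_pos (by omega)]
          · exfalso
            by_cases hr1 : r = 0
            · exact hg (by right; left; omega)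
            · exact hg (by right; right; right; right; exact hvis hr1)
        · -- right column: straight down
          have hd0 : d = 1 := by
            rw [hd]; unfold inD; rw [← hr, if_neg (by omega), if_pos (by omega)]
          subst hd0
          have hring1 : ringOf l (x + 1) y = r :=
            ringOf_eq (by omega) (by omega) (by omega) (by omega) (by omega)
          have hnext : fI l (x + 1) y = k + 2 := by
            have h2 := fI_eq l (x + 1) y; rw [hring1] at h2
            unfold offOf at h2 hfe
            rw [if_neg (by omega), if_pos (by omega)] at hfe
            rw [if_neg (by omega), if_pos (by omega)] at h2
            omega
          simp only [spiralaStep, dirTab1, add_zero]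
          rw [hw]
          have hread : PySem.List.pyGetD (PySem.List.pyGetD (mkMat l (k + 1)) (x + 1) []) y 0 = 0 := by
            rw [mkMat_read l (k + 1) (x + 1) y (by omega) (by omega) (by omega) (by omega)]
            rw [if_neg (by omega)]
          rw [if_neg (by push_neg; exact ⟨by omega, by omega, by omega, by omega, by rw [hread]⟩)]
          refine ⟨rfl, fun _ => ?_⟩
          show 0 ≤ x + 1 ∧ x + 1 < l ∧ 0 ≤ y ∧ y < l ∧ fI l (x + 1) y = k + 1 + 1 ∧
            (1 : Int) = inD l (x + 1) y
          refine ⟨by omega, by omega, by omega, by omega, by omega, ?_⟩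
          unfold inD
          rw [hring1, if_neg (by omega), if_pos (by omega)]
      · by_cases hB : x = l - 1 - r
        · by_cases hC : y = r
          · -- bottom-left corner: turn up
            have hd0 : d = 2 := by
              rw [hd]; unfold inD
              rw [← hr, if_neg (by omega), if_neg (by omega), if_pos (by omega)]
            subst hd0
            have hm3 : 3 ≤ l - 2 * r := by
              by_contra hcon
              have hmeq : l - 2 * r = 2 := by omega
              have hsq : (l - 2 * r) * (l - 2 * r) = 4 := by rw [hmeq]; norm_num
              unfold offOf at hfe
              rw [if_neg (by omega), if_neg (by omega), if_pos (by omega)] at hfe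
              omega
            have hring1 : ringOf l (x + -1) y = r :=
              ringOf_eq (by omega) (by omega) (by omega) (by omega) (by omega)
            have hnext : fI l (x + -1) y = k + 2 := by
              have h2 := fI_eq l (x + -1) y; rw [hring1] at h2
              unfold offOf at h2 hfe
              rw [if_neg (by omega), if_neg (by omega), if_pos (by omega)] at hfe
              rw [if_neg (by omega), if_neg (by omega), if_neg (by omega)] at h2
              omega
            have hvis : r ≠ 0 → PySem.List.pyGetD (PySem.List.pyGetD (mkMat l (k + 1)) x []) (y + -1) 0 ≠ 0 := by
              intro hr1
              have hringA : ringOf l x (y + -1) = r - 1 :=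
                ringOf_eq (by omega) (by omega) (by omega) (by omega) (by omega)
              have hubA := fI_ub hx hx2 (by omega : (0:Int) ≤ y + -1) (by omega)
              have hposA := fI_pos hx hx2 (by omega : (0:Int) ≤ y + -1) (by omega)
              rw [hringA] at hubA
              have hid : (l - 2 * (r - 1)) * (l - 2 * (r - 1))
                  = (l - 2 * r) * (l - 2 * r) + 4 * (l - 2 * r) + 4 := by ring
              rw [mkMat_read l (k + 1) x (y + -1) (by omega) (by omega) (by omega) (by omega)]
              rw [if_pos (by omega)]
              omega
            simp only [spiralaStep, dirTab2, dirTab3, mod43, add_zero]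
            rw [hw]
            split_ifs with hg
            · refine ⟨rfl, fun _ => ?_⟩
              show 0 ≤ x + -1 ∧ x + -1 < l ∧ 0 ≤ y ∧ y < l ∧ fI l (x + -1) y = k + 1 + 1 ∧
                (3 : Int) = inD l (x + -1) y
              refine ⟨by omega, by omega, by omega, by omega, by omega, ?_⟩
              unfold inD
              rw [hring1, if_neg (by omega), if_neg (by omega), if_neg (by omega)]
            · exfalso
              by_cases hr1 : r = 0
              · exact hg (by right; right; left; omega)
              · exact hg (by right; right; right; right; exact hvis hr1)
          · -- bottom row: straight left
            have hd0 : d = 2 := by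
              rw [hd]; unfold inD
              rw [← hr, if_neg (by omega), if_neg (by omega), if_pos (by omega)]
            subst hd0
            have hring1 : ringOf l x (y + -1) = r :=
              ringOf_eq (by omega) (by omega) (by omega) (by omega) (by omega)
            have hnext : fI l x (y + -1) = k + 2 := by
              have h2 := fI_eq l x (y + -1); rw [hring1] at h2
              unfold offOf at h2 hfe
              rw [if_neg (by omega), if_neg (by omega), if_pos (by omega)] at hfe
              rw [if_neg (by omega), if_neg (by omega), if_pos (by omega)] at h2
              omega
            simp only [spiralaStep, dirTab2, add_zero]
            rw [hw]
            have hread : PySem.List.pyGetD (PySem.List.pyGetD (mkMat l (k + 1)) x []) (y + -1) 0 = 0 := by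
              rw [mkMat_read l (k + 1) x (y + -1) (by omega) (by omega) (by omega) (by omega)]
              rw [if_neg (by omega)]
            rw [if_neg (by push_neg; exact ⟨by omega, by omega, by omega, by omega, by rw [hread]⟩)]
            refine ⟨rfl, fun _ => ?_⟩
            show 0 ≤ x ∧ x < l ∧ 0 ≤ y + -1 ∧ y + -1 < l ∧ fI l x (y + -1) = k + 1 + 1 ∧
              (2 : Int) = inD l x (y + -1)
            refine ⟨by omega, by omega, by omega, by omega, by omega, ?_⟩
            unfold inD
            rw [hring1, if_neg (by omega), if_neg (by omega), if_pos (by omega)]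
        · have hyr : y = r := by omega
          by_cases hC : x = r + 1
          · -- top-left inner corner: turn right into next ring
            have hd0 : d = 3 := by
              rw [hd]; unfold inD
              rw [← hr, if_neg (by omega), if_neg (by omega), if_neg (by omega)]
            subst hd0
            have hm3 : 3 ≤ l - 2 * r := by omega
            have hringN : ringOf l x (y + 1) = r + 1 :=
              ringOf_eq (by omega) (by omega) (by omega) (by omega) (by omega)
            have hnext : fI l x (y + 1) = k + 2 := by
              have h2 := fI_eq l x (y + 1); rw [hringN] at h2
              unfold offOf at h2 hfe
              rw [if_neg (by omega), if_neg (by omega), if_neg (by omega)] at hfe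
              rw [if_pos (by omega)] at h2
              have hid : (l - 2 * (r + 1)) * (l - 2 * (r + 1))
                  = (l - 2 * r) * (l - 2 * r) - 4 * (l - 2 * r) + 4 := by ring
              omega
            have hvis : PySem.List.pyGetD (PySem.List.pyGetD (mkMat l (k + 1)) (x + -1) []) y 0 ≠ 0 := by
              have hringA : ringOf l (x + -1) y = r :=
                ringOf_eq (by omega) (by omega) (by omega) (by omega) (by omega)
              have h2A := fI_eq l (x + -1) y; rw [hringA] at h2A
              unfold offOf at h2A hfe
              rw [if_pos (by omega)] at h2A
              rw [if_neg (by omega), if_neg (by omega), if_neg (by omega)] at hfe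
              have hposA := fI_pos (by omega : (0:Int) ≤ x + -1) (by omega : x + -1 < l) hy hy2
              rw [mkMat_read l (k + 1) (x + -1) y (by omega) (by omega) (by omega) (by omega)]
              rw [if_pos (by omega)]
              omega
            simp only [spiralaStep, dirTab3, dirTab0, mod40, add_zero]
            rw [hw]
            split_ifs with hg
            · refine ⟨rfl, fun _ => ?_⟩
              show 0 ≤ x ∧ x < l ∧ 0 ≤ y + 1 ∧ y + 1 < l ∧ fI l x (y + 1) = k + 1 + 1 ∧
                (0 : Int) = inD l x (y + 1)
              refine ⟨by omega, by omega, by omega, by omega, by omega, ?_⟩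
              unfold inD
              rw [hringN, if_pos (by omega)]
            · exact absurd (by right; right; right; right; exact hvis) hg
          · -- left column: straight up
            have hd0 : d = 3 := by
              rw [hd]; unfold inD
              rw [← hr, if_neg (by omega), if_neg (by omega), if_neg (by omega)]
            subst hd0
            have hring1 : ringOf l (x + -1) y = r :=
              ringOf_eq (by omega) (by omega) (by omega) (by omega) (by omega)
            have hnext : fI l (x + -1) y = k + 2 := by
              have h2 := fI_eq l (x + -1) y; rw [hring1] at h2
              unfold offOf at h2 hfe
              rw [if_neg (by omega), if_neg (by omega), if_neg (by omega)] at hfe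
              rw [if_neg (by omega), if_neg (by omega), if_neg (by omega)] at h2
              omega
            simp only [spiralaStep, dirTab3, add_zero]
            rw [hw]
            have hread : PySem.List.pyGetD (PySem.List.pyGetD (mkMat l (k + 1)) (x + -1) []) y 0 = 0 := by
              rw [mkMat_read l (k + 1) (x + -1) y (by omega) (by omega) (by omega) (by omega)]
              rw [if_neg (by omega)]
            rw [if_neg (by push_neg; exact ⟨by omega, by omega, by omega, by omega, by rw [hread]⟩)]
            refine ⟨rfl, fun _ => ?_⟩
            show 0 ≤ x + -1 ∧ x + -1 < l ∧ 0 ≤ y ∧ y < l ∧ fI l (x + -1) y = k + 1 + 1 ∧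
              (3 : Int) = inD l (x + -1) y
            refine ⟨by omega, by omega, by omega, by omega, by omega, ?_⟩
            unfold inD
            rw [hring1, if_neg (by omega), if_neg (by omega), if_neg (by omega)]

lemma loop_inv (l : Int) (_hl : 0 ≤ l) :
    ∀ (c : Nat) (k : Int) (s : List (List Int) × Int × Int × Int),
      k = l * l - (c : Int) → 0 ≤ k → SpInv l k s →
      ((PySem.List.pyRange (k + 1) (l * l + 1) 1).foldl (spiralaStep l) s).1 = mkMat l (l * l) := by
  intro c
  induction c with
  | zero =>
    intro k s hc hk hs
    rw [PySem.List.pyRange_one_eq_nil (by omega)]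
    simpa [hc] using hs.1
  | succ n ih =>
    intro k s hc hk hs
    rw [PySem.List.pyRange_one_cons (by omega)]
    simp only [List.foldl_cons]
    exact ih (k + 1) _ (by omega) (by omega) (step_inv l k s hk (by omega) hs)

theorem spirala_spec : Claim_equal_spirala := by
  intro l _ hpre
  unfold Pre_spirala at hpre
  unfold Spec_spirala
  have hnn : 0 ≤ l * l := mul_self_nonneg l
  have ht0 : (PySem.List.pyRange 0 l 1).map
      (fun _ => (PySem.List.pyRange 0 l 1).map fun _ => (0 : Int)) = mkMat l 0 := by
    unfold mkMat
    apply List.map_congr_left; intro i hi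
    apply List.map_congr_left; intro j hj
    rw [PySem.List.mem_pyRange_one] at hi hj
    have := fI_pos hi.1 hi.2 hj.1 hj.2
    rw [if_neg (by omega)]
  have hinv : SpInv l 0
      ((PySem.List.pyRange 0 l 1).map (fun _ => (PySem.List.pyRange 0 l 1).map fun _ => (0 : Int)),
        0, 0, 0) := by
    refine ⟨ht0, fun hlt => ?_⟩
    have hl1 : 1 ≤ l := by
      by_contra h
      have h0 : l = 0 := by omega
      rw [h0] at hlt; simp at hlt
    have hr0 : ringOf l 0 0 = 0 := by unfold ringOf; omega
    refine ⟨le_refl 0, hl1, le_refl 0, hl1, ?_, ?_⟩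
    · show fI l 0 0 = 0 + 1
      rw [fI_eq, hr0]
      unfold offOf
      rw [if_pos rfl]
      have hsq : (l - 2 * 0) * (l - 2 * 0) = l * l := by ring
      omega
    · show (0 : Int) = inD l 0 0
      unfold inD
      rw [hr0, if_pos rfl]
  have hloop := loop_inv l hpre (l * l).toNat 0 _ (by omega) (le_refl 0) hinv
  have hfin : spirala l = mkMat l (l * l) := by
    unfold spirala
    simpa using hloop
  rw [hfin]
  unfold mkMat spirala_alt
  apply List.map_congr_left; intro i hi
  apply List.map_congr_left; intro j hj
  rw [PySem.List.mem_pyRange_one] at hi hj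
  rw [if_pos (fI_le_sq hi.1 hi.2 hj.1 hj.2)]
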